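-- pv_equiv track=rewrite | github.com/Elapoidea/sieve | sieve.py | possible_primes
-- ===== SOURCE A (Python) =====
-- def possible_primes(bound: int):
--     # base list of primes. this will soon be appended to with numbers adjacent to
--     # a multiple of 6 within the range of [bound]
--     base_primes = [2, 3]
--
--     # while loop paired with a counting variable
--     # this is used instead of a for loop because I can't know how many multiple of
--     # six adjacent numbers there will be
--     i = 0
--
--     while True:
--         i += 1
--
--         # if one less than a multiple of six is within [bound], add it to the list
--         # otherwise break out of the loop
--         if 6 * i - 1 <= bound:
--             base_primes.append(6 * i - 1)
--         else:
--             break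
--
--         # same thing as before, but with one more than a multiple of six
--         if 6 * i + 1 <= bound:
--             base_primes.append(6 * i + 1)
--         else:
--             break
--
--     return base_primes
-- ===== SOURCE B (Python) =====
-- def possible_primes(bound: int):
--     return [2, 3] + [n for n in range(5, bound + 1) if n % 6 in (1, 5)]
-- ===== Notes on version B (the rewrite author's own statement) =====
-- stated objective: simpler
-- what changed: Replaced the while-loop that steps over multiples of six and emits 6i-1/6i+1 with break logic by a single comprehension over range(5, bound+1) filtered by residue mod 6.
import Mathlib
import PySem

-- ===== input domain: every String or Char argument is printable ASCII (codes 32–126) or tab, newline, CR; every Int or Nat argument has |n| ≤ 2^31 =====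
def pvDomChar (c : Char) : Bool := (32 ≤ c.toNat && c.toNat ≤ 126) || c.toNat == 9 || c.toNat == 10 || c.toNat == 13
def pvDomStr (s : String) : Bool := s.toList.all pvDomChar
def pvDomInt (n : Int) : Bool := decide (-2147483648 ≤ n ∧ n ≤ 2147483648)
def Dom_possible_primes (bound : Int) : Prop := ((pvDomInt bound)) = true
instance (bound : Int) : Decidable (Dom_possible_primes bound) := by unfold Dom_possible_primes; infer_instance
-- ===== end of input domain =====

-- B replaces A's while-loop over multiples of six by a residue-mod-6 filtered scan (simpler decomposition; return value only).
-- ===== PORT A =====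
-- while-loop of A: state (i, base_primes); each iteration increments i, appends 6i-1 and 6i+1 or breaks.
def possible_primes_loop (bound i : Int) (acc : List Int) : List Int :=
  if _h1 : 6 * (i + 1) - 1 <= bound then
    if _h2 : 6 * (i + 1) + 1 <= bound then
      possible_primes_loop bound (i + 1) ((acc ++ [6 * (i + 1) - 1]) ++ [6 * (i + 1) + 1])
    else acc ++ [6 * (i + 1) - 1]
  else acc
termination_by (bound + 1 - 6 * i).toNat
decreasing_by omega

def possible_primes (bound : Int) : List Int :=
  possible_primes_loop bound 0 [2, 3]

-- ===== PORT B =====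
def possible_primes_alt (bound : Int) : List Int :=
  [2, 3] ++ (PySem.List.pyRange 5 (bound + 1) 1).filter
      (fun n => PySem.Int.mod n 6 == 1 || PySem.Int.mod n 6 == 5)

-- ===== PRECONDITION & SPEC =====
def Spec_possible_primes (bound : Int) (out : List Int) : Prop := out = possible_primes_alt bound
instance (bound : Int) (out : List Int) : Decidable (Spec_possible_primes bound out) := by unfold Spec_possible_primes; infer_instance

-- ===== CLAIM (what is proved, stated in full; the proofs are below) =====
def Claim_equal_possible_primes : Prop := ∀ (bound : Int), Dom_possible_primes bound → Spec_possible_primes bound (possible_primes bound)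

-- ===== LEMMAS AND PROOFS =====

-- the tail of B's list from a given start point
def pvF (bound a : Int) : List Int :=
  (PySem.List.pyRange a (bound + 1) 1).filter
      (fun n => PySem.Int.mod n 6 == 1 || PySem.Int.mod n 6 == 5)

theorem pvF_step (bound a : Int) :
    pvF bound a = (if a <= bound then
      (if PySem.Int.mod a 6 == 1 || PySem.Int.mod a 6 == 5 then [a] else []) ++ pvF bound (a + 1)
    else []) := by
  unfold pvF
  by_cases h : a <= bound
  · rw [PySem.List.pyRange_one_cons (by omega)]
    simp only [List.filter_cons, if_pos h]
    split <;> simp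
  · rw [PySem.List.pyRange_one_eq_nil (by omega)]
    simp [h]

theorem pvF_empty (bound a : Int) (h : bound < a) : pvF bound a = [] := by
  rw [pvF_step]
  simp [show ¬ a <= bound by omega]

theorem pvmod_true (a : Int) (h : a % 6 = 5 ∨ a % 6 = 1) :
    (PySem.Int.mod a 6 == 1 || PySem.Int.mod a 6 == 5) = true := by
  rw [PySem.Int.mod_eq_emod_of_pos (by norm_num)]
  rcases h with h | h <;> simp [h]

theorem pvmod_false (a : Int) (h : a % 6 = 0 ∨ a % 6 = 2 ∨ a % 6 = 3 ∨ a % 6 = 4) :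
    (PySem.Int.mod a 6 == 1 || PySem.Int.mod a 6 == 5) = false := by
  rw [PySem.Int.mod_eq_emod_of_pos (by norm_num)]
  simp
  omega

-- a number of the skipped residues contributes nothing to B's tail
theorem pvF_skip (bound a : Int) (h : a % 6 = 0 ∨ a % 6 = 2 ∨ a % 6 = 3 ∨ a % 6 = 4) :
    pvF bound a = pvF bound (a + 1) := by
  rw [pvF_step]
  by_cases hb : a <= bound
  · rw [if_pos hb, pvmod_false a h]
    simp
  · rw [if_neg hb, pvF_empty bound (a + 1) (by omega)]

-- a number of the kept residues is emitted iff it is within the bound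
theorem pvF_emit (bound a : Int) (h : a % 6 = 5 ∨ a % 6 = 1) :
    pvF bound a = (if a <= bound then [a] else []) ++ pvF bound (a + 1) := by
  rw [pvF_step]
  by_cases hb : a <= bound
  · rw [if_pos hb, if_pos hb, pvmod_true a h]
    simp
  · rw [if_neg hb, if_neg hb, pvF_empty bound (a + 1) (by omega)]
    simp

-- unfold B's tail across one whole residue block [a, a+6) for a ≡ 5 (mod 6)
theorem pvF_block (bound a : Int) (ha : a % 6 = 5) :
    pvF bound a = (if a <= bound then [a] else []) ++
      ((if a + 2 <= bound then [a + 2] else []) ++ pvF bound (a + 6)) := by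
  rw [pvF_emit bound a (Or.inl ha)]
  rw [pvF_skip bound (a + 1) (by omega)]
  rw [show a + 1 + 1 = a + 2 by ring]
  rw [pvF_emit bound (a + 2) (Or.inr (by omega))]
  rw [pvF_skip bound (a + 2 + 1) (by omega)]
  rw [pvF_skip bound (a + 2 + 1 + 1) (by omega)]
  rw [pvF_skip bound (a + 2 + 1 + 1 + 1) (by omega)]
  rw [show a + 2 + 1 + 1 + 1 + 1 = a + 6 by ring]

-- loop invariant: A's loop from state i with accumulator acc appends exactly B's tail from 6i+5
theorem pv_loop_eq (bound i : Int) (acc : List Int) :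
    possible_primes_loop bound i acc = acc ++ pvF bound (6 * i + 5) := by
  fun_induction possible_primes_loop bound i acc with
  | case1 i acc h1 h2 ih =>
      rw [ih, pvF_block bound (6 * i + 5) (by omega)]
      rw [if_pos (show 6 * i + 5 <= bound by omega),
          if_pos (show 6 * i + 5 + 2 <= bound by omega)]
      rw [show 6 * (i + 1) - 1 = 6 * i + 5 by ring,
          show 6 * (i + 1) + 1 = 6 * i + 5 + 2 by ring,
          show 6 * (i + 1) + 5 = 6 * i + 5 + 6 by ring]
      simp
  | case2 i acc h1 h2 =>
      rw [pvF_block bound (6 * i + 5) (by omega)]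
      rw [if_pos (show 6 * i + 5 <= bound by omega),
          if_neg (show ¬ 6 * i + 5 + 2 <= bound by omega)]
      rw [pvF_empty bound (6 * i + 5 + 6) (by omega)]
      rw [show 6 * (i + 1) - 1 = 6 * i + 5 by ring]
      simp
  | case3 i acc h1 =>
      rw [pvF_empty bound (6 * i + 5) (by omega)]
      simp

-- ===== VERDICT (by name: the statement is the Claim_ definition above) =====
theorem possible_primes_spec : Claim_equal_possible_primes := by
  intro bound _
  unfold Spec_possible_primes possible_primes possible_primes_alt
  rw [pv_loop_eq]
  norm_num [pvF]
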